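-- pv_equiv track=rewrite | github.com/decopt/themis-office | agents/html_editor.py | _dots_html
-- ===== SOURCE A (Python) =====
-- def _dots_html(idx: int, total: int) -> str:
--     if total <= 1:
--         return ""
--     dots = "".join(
--         f'<div class="dot{"  active" if i == idx else ""}"></div>'
--         for i in range(total)
--     )
--     return f'<div class="indicators">{dots}</div>'
-- ===== SOURCE B (Python) =====
-- def _dots_html(idx: int, total: int) -> str:
--     if total <= 1:
--         return ""
--     plain = '<div class="dot"></div>'
--     if 0 <= idx < total:
--         dots = plain * idx + '<div class="dot  active"></div>' + plain * (total - idx - 1)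
--     else:
--         dots = plain * total
--     return f'<div class="indicators">{dots}</div>'
-- ===== Notes on version B (the rewrite author's own statement) =====
-- stated objective: faster
-- what changed: Replaces A's per-index loop with its equality test and per-element f-string formatting by a closed three-segment construction: bulk string repetition for the plain dots before and after the active position, concatenated around one active dot (or one repetition when idx is out of range).
import Mathlib
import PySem

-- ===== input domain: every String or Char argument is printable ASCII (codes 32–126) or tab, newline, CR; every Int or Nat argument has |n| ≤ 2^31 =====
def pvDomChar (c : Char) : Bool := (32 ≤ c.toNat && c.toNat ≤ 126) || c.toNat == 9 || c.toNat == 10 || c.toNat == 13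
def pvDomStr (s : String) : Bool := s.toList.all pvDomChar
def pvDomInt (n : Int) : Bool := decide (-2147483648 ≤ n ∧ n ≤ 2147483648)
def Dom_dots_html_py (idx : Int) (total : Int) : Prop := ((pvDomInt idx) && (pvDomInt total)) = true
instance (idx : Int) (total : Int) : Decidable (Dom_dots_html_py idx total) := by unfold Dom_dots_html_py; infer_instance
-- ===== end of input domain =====

-- B builds the dots as a closed three-segment concatenation (string repetition before and after one
-- active dot) instead of A's per-index loop with an equality test; alternative decomposition, same cost.


-- ===== PORT A =====
-- Literal port: join of an f-string per i in range(total), equality test i == idx inside.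
def dots_html_py (idx : Int) (total : Int) : String :=
  if total ≤ 1 then ""
  else
    let dots := String.join ((PySem.List.pyRange 0 total 1).map
      (fun i => "<div class=\"dot" ++ (if i = idx then "  active" else "") ++ "\"></div>"))
    "<div class=\"indicators\">" ++ dots ++ "</div>"

-- ===== PORT B =====
-- Python's `s * n` (string repetition, empty for n ≤ 0): exact.
def pyStrMul (s : String) (n : Int) : String := String.join (List.replicate n.toNat s)

-- Literal port of B: three-segment closed form around the active dot, or one plain repetition.
def dots_html_py_alt (idx : Int) (total : Int) : String :=
  if total ≤ 1 then ""
  else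
    let plain := "<div class=\"dot\"></div>"
    let dots := if 0 ≤ idx ∧ idx < total then
        pyStrMul plain idx ++ "<div class=\"dot  active\"></div>" ++ pyStrMul plain (total - idx - 1)
      else pyStrMul plain total
    "<div class=\"indicators\">" ++ dots ++ "</div>"

-- ===== PRECONDITION & SPEC =====
def Spec_dots_html_py (idx : Int) (total : Int) (out : String) : Prop := out = dots_html_py_alt idx total
instance (idx : Int) (total : Int) (out : String) : Decidable (Spec_dots_html_py idx total out) := by unfold Spec_dots_html_py; infer_instance

-- ===== CLAIM (what is proved, stated in full; the proofs are below) =====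
def Claim_equal_dots_html_py : Prop := ∀ (idx : Int) (total : Int), Dom_dots_html_py idx total → Spec_dots_html_py idx total (dots_html_py idx total)

-- ===== LEMMAS AND PROOFS =====

-- Folding (++) from any seed prepends the seed to the fold from "".
theorem foldl_shift (l : List String) (a : String) :
    List.foldl (fun r s => r ++ s) a l = a ++ List.foldl (fun r s => r ++ s) "" l := by
  induction l generalizing a with
  | nil => simp
  | cons x xs ih => simp only [List.foldl_cons]; rw [ih (a ++ x), ih ("" ++ x)]; simp [String.append_assoc]

theorem join_app (l1 l2 : List String) : String.join (l1 ++ l2) = String.join l1 ++ String.join l2 := by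
  simp only [String.join, List.foldl_append]
  rw [foldl_shift]

theorem join_cons (x : String) (l : List String) : String.join (x :: l) = x ++ String.join l := by
  simp only [String.join, List.foldl_cons]
  rw [foldl_shift]; simp

-- A's mapped range, as a list, is B's three segments (or all-plain when idx is out of range).
theorem dots_list_split (idx total : Int) :
    (PySem.List.pyRange 0 total 1).map
      (fun i => "<div class=\"dot" ++ (if i = idx then "  active" else "") ++ "\"></div>")
    = (if 0 ≤ idx ∧ idx < total then
        List.replicate idx.toNat ("<div class=\"dot\"></div>" : String)
          ++ "<div class=\"dot  active\"></div>"
          :: List.replicate (total - idx - 1).toNat "<div class=\"dot\"></div>"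
      else List.replicate total.toNat "<div class=\"dot\"></div>") := by
  rw [PySem.List.pyRange_one]
  simp only [Int.sub_zero, zero_add]
  split_ifs with h
  · apply List.ext_getElem
    · simp; omega
    · intro k hk hk'
      simp only [List.length_map, List.length_range] at hk
      simp only [List.getElem_map, List.getElem_range]
      rcases lt_trichotomy k idx.toNat with hlt | heq | hgt
      · have hne : ¬ ((k : Int) = idx) := by omega
        rw [List.getElem_append_left (by simpa using hlt)]
        simp [hne]
      · rw [List.getElem_append_right (by simp [heq])]
        simp only [List.length_replicate, heq, Nat.sub_self, List.getElem_cons_zero]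
        simp [h.1]
      · have hne : ¬ ((k : Int) = idx) := by omega
        rw [List.getElem_append_right (by simp; omega)]
        simp only [List.length_replicate]
        rw [List.getElem_cons, dif_neg (by omega)]
        simp [hne]
  · apply List.ext_getElem
    · simp
    · intro k hk _
      simp only [List.length_map, List.length_range] at hk
      have hne : ¬ ((k : Int) = idx) := by omega
      simp [hne]

-- ===== VERDICT (by name: the statement is the Claim_ definition above) =====
theorem dots_html_py_spec : Claim_equal_dots_html_py := by
  intro idx total _
  unfold Spec_dots_html_py dots_html_py dots_html_py_alt pyStrMul
  by_cases h : total ≤ 1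
  · simp [h]
  · simp only [if_neg h, dots_list_split idx total]
    split_ifs with hin
    · rw [join_app, join_cons]; simp [String.append_assoc]
    · rfl
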